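-- pv_equiv track=rewrite | github.com/edwintcloud/algorithmPractice | misc/question12.py | is_contiguous
-- ===== SOURCE A (Python) =====
-- def is_contiguous(arr, count=0):
--     '''is_contiguous searches arr for a contiguous group of 0s
--        Input: 2d array,
--        Output: bool'''
--
--     # go through our 2d array until we find a 0
--     for x in range(len(arr)):
--         for y in range(len(arr[x])):
--
--             # once a 0 is found, recursively search neighbors
--             # until we hit a 1 or go out of bounds
--             if arr[x][y] == 0:
--                 find_neighbors(arr, x, y)
--
--                 # since neighbors were marked as they were visited,
--                 # count should only be incremented once if the group
--                 # of 0s is contiguous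
--                 count += 1
--
--     # if count is not greater than 1, return True
--     if count == 1:
--         return True
--
--     # otherwise, return False
--     return False
--
-- def find_neighbors(arr, x, y):
--     '''find_neighbors is a recursive depth-first search
--        to find all neighbors in the 2d array'''
--
--     # make sure we can safely visit current neighbor
--     if is_safe(arr, x, y) is False:
--         return
--
--     # if we hit a 1 or -1, we are done searching
--     if arr[x][y] != 0:
--         return
--
--     # set visited neighbors to -1 to mark them
--     arr[x][y] = -1
--
--     # indexes to search neighbors
--     indexes = [-1, 1, 0, 0]
--
--     # recursively search neighbors in all four directions
--     # until we go out of bounds or hit a 1 or -1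
--     for i in range(len(indexes)):
--         find_neighbors(arr, x+indexes[i], y+indexes[-1-i])
--
-- def is_safe(arr, x, y):
--     '''is_safe checks to make sure we can safely visit a neighbor
--        without going out of bounds'''
--
--     if x < 0 or y < 0:
--         return False
--     if x >= len(arr) or y >= len(arr[x]):
--         return False
-- ===== SOURCE B (Python) =====
-- def is_contiguous(arr, count=0):
--     '''is_contiguous searches arr for a contiguous group of 0s
--        (iterative: explicit LIFO-stack flood fill instead of recursion).
--        Mutates arr in place like the original (reachable 0s become -1).
--        Input: 2d array,
--        Output: bool'''
--     for x, row in enumerate(arr):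
--         for y in range(len(row)):
--             if row[y] == 0:
--                 stack = [(x, y)]
--                 while stack:
--                     i, j = stack.pop()
--                     if 0 <= i < len(arr) and 0 <= j < len(arr[i]) and arr[i][j] == 0:
--                         arr[i][j] = -1
--                         stack.append((i, j - 1))
--                         stack.append((i, j + 1))
--                         stack.append((i + 1, j))
--                         stack.append((i - 1, j))
--                 count += 1
--     return count == 1
-- ===== Notes on version B (the rewrite author's own statement) =====
-- stated objective: idiomatic
-- what changed: Replaces the recursive depth-first flood fill (find_neighbors + is_safe) with an explicit LIFO-stack loop inlined in the scan, so no recursion is used at all.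
import Mathlib
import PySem

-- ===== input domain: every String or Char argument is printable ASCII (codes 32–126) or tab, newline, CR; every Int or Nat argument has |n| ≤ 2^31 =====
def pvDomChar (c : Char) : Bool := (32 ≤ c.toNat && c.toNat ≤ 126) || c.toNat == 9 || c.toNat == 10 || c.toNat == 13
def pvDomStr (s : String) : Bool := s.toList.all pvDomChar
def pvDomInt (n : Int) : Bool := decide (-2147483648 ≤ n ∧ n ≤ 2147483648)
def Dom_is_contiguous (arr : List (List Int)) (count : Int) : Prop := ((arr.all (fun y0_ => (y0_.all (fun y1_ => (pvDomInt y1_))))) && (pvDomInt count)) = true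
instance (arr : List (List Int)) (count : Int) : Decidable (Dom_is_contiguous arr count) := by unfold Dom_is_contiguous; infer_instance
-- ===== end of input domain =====

-- B replaces A's recursive depth-first flood fill (find_neighbors + is_safe) with an explicit
-- LIFO-stack loop (idiomatic, no recursion); both Pythons mutate arr in place identically
-- (every reachable 0 becomes -1), and the theorems below are about the returned Bool.

-- ===== PORT A =====

-- arr[x][y] read; in both ports it is only evaluated with 0 ≤ x < len(arr) and
-- 0 ≤ y < len(arr[x]) (guarded by is_safe / the scan ranges / B's bounds test), where getD is exact.

def pvGGet (g : List (List Int)) (x y : Int) : Int :=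
  (g.getD x.toNat []).getD y.toNat 1

-- arr[x][y] = -1 (only executed with the indices in range, where modify/set are exact)
def pvMark (g : List (List Int)) (x y : Int) : List (List Int) :=
  g.modify x.toNat (fun row => row.set y.toNat (-1))

-- number of 0 cells (termination measure for B's stack loop; also bounds A's recursion depth)
def pvZeros (g : List (List Int)) : Nat := g.flatten.count 0

-- is_safe: 'x < 0 or y < 0', then 'x >= len(arr) or y >= len(arr[x])' (short-circuit order kept)
def pvSafe (g : List (List Int)) (x y : Int) : Bool :=
  if x < 0 || y < 0 then false
  else if (g.length : Int) ≤ x || ((g.getD x.toNat []).length : Int) ≤ y then false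
  else true

-- find_neighbors: fuel-based port of the recursion; fuel = #cells + 1 at every call site is a
-- proven bound on the recursion depth (each recursing level marks a 0 cell, see pv_zeros_mark_lt
-- and pv_zeros_dfs_le below), so the fuel never runs out and the port is exact.
-- indexes = [-1,1,0,0]; step i visits (x+indexes[i], y+indexes[-1-i]).
def pvDfsA : Nat → List (List Int) → Int → Int → List (List Int)
  | 0, g, _, _ => g
  | f+1, g, x, y =>
    if pvSafe g x y = false then g
    else if pvGGet g x y != 0 then g
    else
      let g0 := pvMark g x y
      let g1 := pvDfsA f g0 (x - 1) y
      let g2 := pvDfsA f g1 (x + 1) y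
      let g3 := pvDfsA f g2 x (y + 1)
      pvDfsA f g3 x (y - 1)

def is_contiguous (arr : List (List Int)) (count : Int) : Bool :=
  ((List.range arr.length).foldl
    (fun (st : List (List Int) × Int) (x : Nat) =>
      (List.range (st.1.getD x []).length).foldl
        (fun st2 (y : Nat) =>
          if pvGGet st2.1 (x : Int) (y : Int) == 0 then
            (pvDfsA (arr.flatten.length + 1) st2.1 (x : Int) (y : Int), st2.2 + 1)
          else st2) st)
    (arr, count)).2 == 1

-- ===== PORT B =====

-- next three lemmas are cited by pvStackLoop's decreasing_by: marking a 0 cell strictly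
-- decreases the number of 0 cells
theorem pv_count_set_lt : ∀ (l : List Int) (i : Nat), i < l.length → l.getD i 1 = 0 →
    (l.set i (-1)).count 0 < l.count 0 := by
  intro l
  induction l with
  | nil => intro i h; simp at h
  | cons a t ih =>
    intro i hi h0
    cases i with
    | zero =>
      simp only [List.getD_cons_zero] at h0
      subst h0
      simp [List.count_cons]
    | succ n =>
      simp only [List.length_cons] at hi
      simp only [List.getD_cons_succ] at h0
      have := ih n (by omega) h0
      simp only [List.set_cons_succ, List.count_cons]
      omega

theorem pv_zeros_modify_lt : ∀ (g : List (List Int)) (i : Nat) (f : List Int → List Int),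
    i < g.length → (f (g.getD i [])).count 0 < (g.getD i []).count 0 →
    pvZeros (g.modify i f) < pvZeros g := by
  intro g
  induction g with
  | nil => intro i f h; simp at h
  | cons a t ih =>
    intro i f hi hf
    cases i with
    | zero =>
      simp only [List.getD_cons_zero] at hf
      simp [pvZeros, List.modify_cons, List.count_append]
      omega
    | succ n =>
      simp only [List.length_cons] at hi
      simp only [List.getD_cons_succ] at hf
      have := ih n f (by omega) hf
      simp only [List.modify_cons, Nat.succ_ne_zero, if_false, Nat.add_sub_cancel]
      simp [pvZeros, List.count_append] at this ⊢
      omega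

theorem pv_zeros_mark_lt (g : List (List Int)) (x y : Int)
    (hx0 : 0 ≤ x) (hx : x.toNat < g.length) (hy0 : 0 ≤ y)
    (hy : y.toNat < (g.getD x.toNat []).length)
    (h0 : (g.getD x.toNat []).getD y.toNat 1 = 0) :
    pvZeros (pvMark g x y) < pvZeros g := by
  exact pv_zeros_modify_lt g x.toNat _ hx (by
    have := pv_count_set_lt (g.getD x.toNat []) y.toNat hy h0
    simpa using this)

-- the 'while stack:' loop: pop (i,j); if in bounds and still 0, mark it and push the four
-- neighbours (list head = top of stack, so the last-appended (i-1,j) is popped first)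
def pvStackLoop (g : List (List Int)) (stack : List (Int × Int)) : List (List Int) :=
  match stack with
  | [] => g
  | (i, j) :: rest =>
    if h : 0 ≤ i ∧ i.toNat < g.length ∧ 0 ≤ j ∧ j.toNat < (g.getD i.toNat []).length
         ∧ (g.getD i.toNat []).getD j.toNat 1 = 0 then
      pvStackLoop (pvMark g i j) ((i-1, j) :: (i+1, j) :: (i, j+1) :: (i, j-1) :: rest)
    else pvStackLoop g rest
termination_by 4 * pvZeros g + stack.length
decreasing_by
  · have := pv_zeros_mark_lt g i j h.1 h.2.1 h.2.2.1 h.2.2.2.1 h.2.2.2.2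
    simp only [List.length_cons]
    omega
  · simp only [List.length_cons]
    omega

def is_contiguous_alt (arr : List (List Int)) (count : Int) : Bool :=
  ((PySem.List.enumerate arr).foldl
    (fun (st : List (List Int) × Int) (xr : Int × List Int) =>
      (List.range xr.2.length).foldl
        (fun st2 (y : Nat) =>
          if pvGGet st2.1 xr.1 (y : Int) == 0 then
            (pvStackLoop st2.1 [(xr.1, (y : Int))], st2.2 + 1)
          else st2) st)
    (arr, count)).2 == 1

-- ===== PRECONDITION & SPEC =====
def Spec_is_contiguous (arr : List (List Int)) (count : Int) (out : Bool) : Prop := out = is_contiguous_alt arr count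
instance (arr : List (List Int)) (count : Int) (out : Bool) : Decidable (Spec_is_contiguous arr count out) := by unfold Spec_is_contiguous; infer_instance

-- ===== CLAIM (what is proved, stated in full; the proofs are below) =====
def Claim_equal_is_contiguous : Prop := ∀ (arr : List (List Int)) (count : Int), Dom_is_contiguous arr count → Spec_is_contiguous arr count (is_contiguous arr count)

-- ===== LEMMAS AND PROOFS =====

theorem pv_safe_iff (g : List (List Int)) (x y : Int) :
    pvSafe g x y = true ↔
      0 ≤ x ∧ x.toNat < g.length ∧ 0 ≤ y ∧ y.toNat < (g.getD x.toNat []).length := by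
  unfold pvSafe
  split_ifs with h1 h2
  · simp only [Bool.false_eq_true, false_iff]
    simp only [Bool.or_eq_true, decide_eq_true_eq] at h1
    omega
  · simp only [Bool.false_eq_true, false_iff]
    simp only [Bool.or_eq_true, decide_eq_true_eq] at h1 h2
    omega
  · simp only [true_iff]
    simp only [Bool.or_eq_true, decide_eq_true_eq, not_or, not_lt, not_le] at h1 h2
    omega

theorem pv_shape_modify : ∀ (g : List (List Int)) (i : Nat) (f : List Int → List Int),
    (∀ r, (f r).length = r.length) → (g.modify i f).map List.length = g.map List.length := by
  intro g
  induction g with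
  | nil => intro i f _; simp
  | cons a t ih =>
    intro i f hf
    cases i with
    | zero => simp [List.modify_cons, hf]
    | succ n => simp [List.modify_cons, ih n f hf]

theorem pv_shape_mark (g : List (List Int)) (x y : Int) :
    (pvMark g x y).map List.length = g.map List.length :=
  pv_shape_modify g x.toNat _ (fun _ => List.length_set)

theorem pv_shape_dfs : ∀ (f : Nat) (g : List (List Int)) (x y : Int),
    (pvDfsA f g x y).map List.length = g.map List.length := by
  intro f
  induction f with
  | zero => intro g x y; simp [pvDfsA]
  | succ f ih =>
    intro g x y
    rw [pvDfsA]
    split_ifs with h1 h2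
    · rfl
    · rfl
    · rw [ih, ih, ih, ih, pv_shape_mark]

theorem pv_zeros_dfs_le : ∀ (f : Nat) (g : List (List Int)) (x y : Int),
    pvZeros (pvDfsA f g x y) ≤ pvZeros g := by
  intro f
  induction f with
  | zero => intro g x y; simp [pvDfsA]
  | succ f ih =>
    intro g x y
    rw [pvDfsA]
    split_ifs with h1 h2
    · exact le_refl _
    · exact le_refl _
    · have hs : pvSafe g x y = true := by
        cases h : pvSafe g x y
        · exact absurd h h1
        · rfl
      obtain ⟨hx0, hx, hy0, hy⟩ := (pv_safe_iff g x y).1 hs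
      have h0 : pvGGet g x y = 0 := by
        simpa using h2
      have hm : pvZeros (pvMark g x y) < pvZeros g :=
        pv_zeros_mark_lt g x y hx0 hx hy0 hy h0
      calc pvZeros (pvDfsA f (pvDfsA f (pvDfsA f (pvDfsA f (pvMark g x y) (x-1) y) (x+1) y) x (y+1)) x (y-1))
          ≤ pvZeros (pvDfsA f (pvDfsA f (pvDfsA f (pvMark g x y) (x-1) y) (x+1) y) x (y+1)) := ih _ _ _
        _ ≤ pvZeros (pvDfsA f (pvDfsA f (pvMark g x y) (x-1) y) (x+1) y) := ih _ _ _
        _ ≤ pvZeros (pvDfsA f (pvMark g x y) (x-1) y) := ih _ _ _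
        _ ≤ pvZeros (pvMark g x y) := ih _ _ _
        _ ≤ pvZeros g := le_of_lt hm

theorem pv_bridge : ∀ (f : Nat) (g : List (List Int)) (x y : Int) (rest : List (Int × Int)),
    pvZeros g < f →
    pvStackLoop g ((x, y) :: rest) = pvStackLoop (pvDfsA f g x y) rest := by
  intro f
  induction f with
  | zero => intro g x y rest h; omega
  | succ f ih =>
    intro g x y rest hf
    rw [pvStackLoop]
    by_cases hc : 0 ≤ x ∧ x.toNat < g.length ∧ 0 ≤ y ∧ y.toNat < (g.getD x.toNat []).length
         ∧ (g.getD x.toNat []).getD y.toNat 1 = 0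
    · rw [dif_pos hc]
      obtain ⟨hx0, hx, hy0, hy, h0⟩ := hc
      have hs : pvSafe g x y = true := (pv_safe_iff g x y).2 ⟨hx0, hx, hy0, hy⟩
      have hA : pvDfsA (f+1) g x y
          = pvDfsA f (pvDfsA f (pvDfsA f (pvDfsA f (pvMark g x y) (x-1) y) (x+1) y) x (y+1)) x (y-1) := by
        rw [pvDfsA]
        have hg : pvGGet g x y = 0 := h0
        rw [if_neg (by simp [hs]), if_neg (by simp [hg])]
      have hm : pvZeros (pvMark g x y) < pvZeros g :=
        pv_zeros_mark_lt g x y hx0 hx hy0 hy h0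
      have h1 : pvZeros (pvMark g x y) < f := by omega
      have h2 : pvZeros (pvDfsA f (pvMark g x y) (x-1) y) < f :=
        lt_of_le_of_lt (pv_zeros_dfs_le _ _ _ _) h1
      have h3 : pvZeros (pvDfsA f (pvDfsA f (pvMark g x y) (x-1) y) (x+1) y) < f :=
        lt_of_le_of_lt (pv_zeros_dfs_le _ _ _ _) h2
      have h4 : pvZeros (pvDfsA f (pvDfsA f (pvDfsA f (pvMark g x y) (x-1) y) (x+1) y) x (y+1)) < f :=
        lt_of_le_of_lt (pv_zeros_dfs_le _ _ _ _) h3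
      rw [ih _ _ _ _ h1, ih _ _ _ _ h2, ih _ _ _ _ h3, ih _ _ _ _ h4, hA]
    · rw [dif_neg hc]
      have hA : pvDfsA (f+1) g x y = g := by
        rw [pvDfsA]
        by_cases hs : pvSafe g x y = true
        · obtain ⟨hx0, hx, hy0, hy⟩ := (pv_safe_iff g x y).1 hs
          have h0 : ¬ (g.getD x.toNat []).getD y.toNat 1 = 0 := by
            intro h; exact hc ⟨hx0, hx, hy0, hy, h⟩
          have hg : ¬ pvGGet g x y = 0 := h0
          rw [if_neg (by simp [hs]), if_pos (by simp [hg])]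
        · rw [if_pos (by simpa using hs)]
      rw [hA]

theorem pv_foldl_inv {σ ι : Type} (P : σ → Prop) (f : σ → ι → σ) :
    ∀ (l : List ι) (s : σ), P s → (∀ s i, P s → P (f s i)) → P (l.foldl f s) := by
  intro l
  induction l with
  | nil => intro s hs _; exact hs
  | cons a t ih => intro s hs hp; exact ih (f s a) (hp s a hs) hp

theorem pv_foldl_congr_inv {σ ι : Type} (P : σ → Prop) (f g : σ → ι → σ) :
    ∀ (l : List ι) (s : σ), P s → (∀ s i, P s → P (f s i)) → (∀ s i, P s → f s i = g s i) →
    l.foldl f s = l.foldl g s := by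
  intro l
  induction l with
  | nil => intro s _ _ _; rfl
  | cons a t ih =>
    intro s hs hp he
    simp only [List.foldl_cons]
    rw [← he s a hs]
    exact ih (f s a) (hp s a hs) hp he

theorem pv_enum_foldl {σ : Type} (F : σ → Int × List Int → σ) :
    ∀ (rs : List (List Int)) (s : Int) (st : σ),
    (PySem.List.enumerate rs s).foldl F st
      = (List.range rs.length).foldl (fun st2 (k : Nat) => F st2 (s + (k : Int), rs.getD k [])) st := by
  intro rs
  induction rs with
  | nil => intro s st; simp [PySem.List.enumerate]
  | cons r t ih =>
    intro s st
    rw [PySem.List.enumerate_cons]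
    simp only [List.foldl_cons, List.length_cons, List.range_succ_eq_map, List.foldl_map]
    rw [ih (s+1) (F st (s, r))]
    simp only [List.getD_cons_zero, Int.add_zero, Nat.cast_zero]
    congr 1
    funext st2 k
    simp only [List.getD_cons_succ]
    congr 2
    push_cast
    ring

theorem pv_getD_len_eq : ∀ (g h : List (List Int)), g.map List.length = h.map List.length →
    ∀ k, (g.getD k []).length = (h.getD k []).length := by
  intro g
  induction g with
  | nil =>
    intro h hh k
    cases h with
    | nil => rfl
    | cons b t => simp at hh
  | cons a t ih =>
    intro h hh k
    cases h with
    | nil => simp at hh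
    | cons b u =>
      simp only [List.map_cons, List.cons.injEq] at hh
      cases k with
      | zero => simpa using hh.1
      | succ n => simpa using ih u hh.2 n

theorem pv_zeros_le_sum (g : List (List Int)) : pvZeros g ≤ (g.map List.length).sum := by
  have h1 : pvZeros g ≤ g.flatten.length := List.count_le_length
  simpa [List.length_flatten] using h1

theorem pv_main (arr : List (List Int)) (count : Int) :
    is_contiguous arr count = is_contiguous_alt arr count := by
  have hmain :
      (List.range arr.length).foldl
        (fun (st : List (List Int) × Int) (x : Nat) =>
          (List.range (st.1.getD x []).length).foldl
            (fun st2 (y : Nat) =>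
              if pvGGet st2.1 (x : Int) (y : Int) == 0 then
                (pvDfsA (arr.flatten.length + 1) st2.1 (x : Int) (y : Int), st2.2 + 1)
              else st2) st) (arr, count)
      = (List.range arr.length).foldl
        (fun (st : List (List Int) × Int) (k : Nat) =>
          (List.range (arr.getD k []).length).foldl
            (fun st2 (y : Nat) =>
              if pvGGet st2.1 (k : Int) (y : Int) == 0 then
                (pvStackLoop st2.1 [((k : Int), (y : Int))], st2.2 + 1)
              else st2) st) (arr, count) := by
    refine pv_foldl_congr_inv (fun (st : List (List Int) × Int) => st.1.map List.length = arr.map List.length)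
      _ _ _ _ rfl ?_ ?_
    · -- the A-step preserves the shape invariant
      intro s i hs
      refine pv_foldl_inv (fun (st : List (List Int) × Int) => st.1.map List.length = arr.map List.length) _ _ _ hs ?_
      intro s2 y hs2
      by_cases h : pvGGet s2.1 (i : Int) (y : Int) == 0
      · simpa [h] using (pv_shape_dfs (arr.flatten.length + 1) s2.1 i y).trans hs2
      · simpa [h] using hs2
    · -- the two inner folds agree on shape-invariant states
      intro s i hs
      rw [pv_getD_len_eq s.1 arr hs i]
      refine pv_foldl_congr_inv (fun (st : List (List Int) × Int) => st.1.map List.length = arr.map List.length)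
        _ _ _ _ hs ?_ ?_
      · intro s2 y hs2
        by_cases h : pvGGet s2.1 (i : Int) (y : Int) == 0
        · simpa [h] using (pv_shape_dfs (arr.flatten.length + 1) s2.1 i y).trans hs2
        · simpa [h] using hs2
      · intro s2 y hs2
        by_cases h : pvGGet s2.1 (i : Int) (y : Int) == 0
        · have hz : pvZeros s2.1 < arr.flatten.length + 1 := by
            have h1 := pv_zeros_le_sum s2.1
            rw [hs2] at h1
            have h2 : (arr.map List.length).sum = arr.flatten.length := by
              simp [List.length_flatten]
            omega
          have hb := pv_bridge (arr.flatten.length + 1) s2.1 (i : Int) (y : Int) [] hz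
          have hb2 : pvStackLoop (pvDfsA (arr.flatten.length + 1) s2.1 (i : Int) (y : Int)) []
              = pvDfsA (arr.flatten.length + 1) s2.1 (i : Int) (y : Int) := by
            rw [pvStackLoop]
          simp only [h, if_true]
          rw [hb, hb2]
        · simp [h]
  unfold is_contiguous is_contiguous_alt
  rw [pv_enum_foldl _ arr 0 (arr, count), hmain]
  simp only [Int.zero_add]

-- ===== VERDICT (by name: the statement is the Claim_ definition above) =====
theorem is_contiguous_spec : Claim_equal_is_contiguous := by
  intro arr count _
  unfold Spec_is_contiguous
  exact pv_main arr count
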